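-- pv_equiv track=rewrite | github.com/kateblolo/advent_of_code_2020 | day17/day17.py | add_inactive_extremities
-- ===== SOURCE A (Python) =====
-- import copy
--
-- def add_inactive_extremities(input):
--     line = [0 for i in range(len(input[0][0]))]
--     grid = [line[:] for i in range(len(input[0]))]
--     input.insert(0, copy.deepcopy(grid))
--     input.append(copy.deepcopy(grid))
--     for g in input:
--         g.insert(0, line[:])
--         g.append(line[:])
--         for l in g:
--             l.insert(0, 0)
--             l.append(0)
--     return input
-- ===== SOURCE B (Python) =====
-- def add_inactive_extremities(input):
--     H = len(input[0])
--     W = len(input[0][0])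
--     zrow = [0] * (W + 2)
--     zgrid = [zrow[:] for _ in range(H + 2)]
--     new = (
--         [zgrid]
--         + [[zrow[:]] + [[0] + row + [0] for row in g] + [zrow[:]] for g in input]
--         + [[r[:] for r in zgrid]]
--     )
--     input[:] = new
--     return input
-- ===== Notes on version B (the rewrite author's own statement) =====
-- stated objective: simpler
-- what changed: A mutates the grid in place with insert/append loops at every nesting level; B computes the padded grid's dimensions once and builds the whole result as a single comprehension/concatenation expression (zero rows/layers made by replication), then slice-assigns it back.
import Mathlib
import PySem

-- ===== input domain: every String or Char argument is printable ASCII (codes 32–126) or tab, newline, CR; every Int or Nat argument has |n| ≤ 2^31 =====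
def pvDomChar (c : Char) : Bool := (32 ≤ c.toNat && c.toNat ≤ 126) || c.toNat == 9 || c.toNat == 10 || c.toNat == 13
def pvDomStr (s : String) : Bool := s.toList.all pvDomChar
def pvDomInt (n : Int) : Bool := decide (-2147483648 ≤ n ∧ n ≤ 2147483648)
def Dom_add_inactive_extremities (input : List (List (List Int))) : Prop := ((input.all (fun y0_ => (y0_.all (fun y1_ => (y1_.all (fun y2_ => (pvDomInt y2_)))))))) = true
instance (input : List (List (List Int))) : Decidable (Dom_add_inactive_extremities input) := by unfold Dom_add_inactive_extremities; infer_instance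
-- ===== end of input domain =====

-- B builds the padded grid as one comprehension/concatenation expression instead of A's
-- in-place insert/append loops (equivalence is about the return value; both Pythons also
-- mutate the argument list to the same value, though B rebuilds the inner lists).


-- ===== PORT A =====
-- A reads len(input[0][0]) and len(input[0]) (IndexError when input or input[0] is
-- empty — excluded by Pre_), builds a zero line and zero grid, inserts the grid at both
-- ends, then pads every layer with zero rows and every row with a 0 at both ends.
def add_inactive_extremities (input : List (List (List Int))) : List (List (List Int)) :=
  match input with
  | [] => []                      -- Python raises IndexError here; outside Pre_
  | g0 :: _ =>
    match g0 with
    | [] => []                    -- Python raises IndexError here; outside Pre_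
    | r0 :: _ =>
      let line : List Int := (List.range r0.length).map (fun _ => 0)
      let grid : List (List Int) := (List.range g0.length).map (fun _ => line)
      let input1 := grid :: (input ++ [grid])
      input1.map (fun g =>
        let g1 := line :: (g ++ [line])
        g1.map (fun l => 0 :: (l ++ [0])))

-- ===== PORT B =====
-- B: dimensions once, zero row/grid by replication, result as one concatenation.
def add_inactive_extremities_alt (input : List (List (List Int))) : List (List (List Int)) :=
  match input with
  | [] => []                      -- Python raises IndexError here; outside Pre_
  | g0 :: _ =>
    match g0 with
    | [] => []                    -- Python raises IndexError here; outside Pre_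
    | r0 :: _ =>
      let W := r0.length
      let H := g0.length
      let zrow : List Int := List.replicate (W + 2) 0
      let zgrid : List (List Int) := List.replicate (H + 2) zrow
      zgrid :: ((input.map (fun g => zrow :: ((g.map (fun row => 0 :: (row ++ [0]))) ++ [zrow]))) ++ [zgrid])

-- ===== PRECONDITION & SPEC =====
-- Pre_ excludes exactly the inputs where Python A raises IndexError reading input[0][0]:
-- the empty list and inputs whose first layer is empty.
def Pre_add_inactive_extremities (input : List (List (List Int))) : Prop :=
  input ≠ [] ∧ input.headI ≠ []
instance (input : List (List (List Int))) : Decidable (Pre_add_inactive_extremities input) := by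
  unfold Pre_add_inactive_extremities; infer_instance
def pvWitness_add_inactive_extremities : List (List (List Int)) := [[[1]]]

def Spec_add_inactive_extremities (input : List (List (List Int))) (out : List (List (List Int))) : Prop := out = add_inactive_extremities_alt input
instance (input : List (List (List Int))) (out : List (List (List Int))) : Decidable (Spec_add_inactive_extremities input out) := by unfold Spec_add_inactive_extremities; infer_instance

-- ===== CLAIM (what is proved, stated in full; the proofs are below) =====
def Claim_equal_add_inactive_extremities : Prop := ∀ (input : List (List (List Int))), Dom_add_inactive_extremities input → Pre_add_inactive_extremities input → Spec_add_inactive_extremities input (add_inactive_extremities input)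

-- ===== LEMMAS AND PROOFS =====

-- Inserting an element at both ends of a replicate list extends the replicate by two.
theorem pv_rep2 {a : Type} (x : a) (n : Nat) :
    x :: (List.replicate n x ++ [x]) = List.replicate (n + 2) x := by
  rw [show n + 2 = (n + 1) + 1 from rfl, List.replicate_succ, List.replicate_succ']

-- ===== VERDICT (by name: the statement is the Claim_ definition above) =====
theorem add_inactive_extremities_spec : Claim_equal_add_inactive_extremities := by
  intro input _ _
  unfold Spec_add_inactive_extremities add_inactive_extremities add_inactive_extremities_alt
  match input with
  | [] => rfl
  | [] :: t => rfl
  | (r0 :: g0t) :: t =>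
    simp only [List.map_const', List.length_range, List.map_cons, List.map_append,
      List.map_replicate, List.map_nil, pv_rep2]
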